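-- pv_equiv track=rewrite | github.com/bakker4444/Algorithms | Python/Cracking_interview_Ch08_05_recursiveMultiply.py | recursiveMultiply1
-- ===== SOURCE A (Python) =====
-- def recursiveMultiply1(num1, num2):
--     result = 0
--     while num2 > 0:
--         if num2 % 2 == 1:
--             result += num1
--         num1 = num1 << 1
--         num2 = num2 >> 1
--     return result
-- ===== SOURCE B (Python) =====
-- def recursiveMultiply1(num1, num2):
--     # closed form: the shift-and-add loop computes exactly num1 * num2 for
--     # positive num2 and 0 for non-positive num2
--     return num1 * num2 if num2 > 0 else 0
-- ===== Notes on version B (the rewrite author's own statement) =====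
-- stated objective: faster
-- what changed: Replaces the shift-and-add accumulator loop with the closed form num1*num2 for num2 > 0 (0 otherwise).
import Mathlib
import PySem

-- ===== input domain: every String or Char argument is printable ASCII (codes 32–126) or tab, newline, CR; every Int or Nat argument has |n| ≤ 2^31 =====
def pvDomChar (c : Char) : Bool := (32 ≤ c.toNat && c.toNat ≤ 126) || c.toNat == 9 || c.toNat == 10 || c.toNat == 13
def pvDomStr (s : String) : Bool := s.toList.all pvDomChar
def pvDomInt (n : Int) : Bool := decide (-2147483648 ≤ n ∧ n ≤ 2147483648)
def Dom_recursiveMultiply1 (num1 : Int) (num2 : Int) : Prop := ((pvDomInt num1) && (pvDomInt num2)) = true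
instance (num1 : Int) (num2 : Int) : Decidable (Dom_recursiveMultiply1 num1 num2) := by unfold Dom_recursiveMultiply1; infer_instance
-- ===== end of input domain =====

-- B replaces A's shift-and-add loop with the closed form num1*num2 for num2 > 0 (0 otherwise): faster.
-- ===== PORT A =====
-- A's while loop as a tail recursion over the same state (result, num1, num2);
-- Python `num1 << 1` = num1 * 2 exactly on ints, `num2 >> 1` = floor division by 2
def rmLoopA (num1 : Int) (num2 : Int) (result : Int) : Int :=
  if _h : num2 > 0 then
    rmLoopA (num1 * 2) (PySem.Int.floordiv num2 2)
      (if PySem.Int.mod num2 2 = 1 then result + num1 else result)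
  else result
termination_by num2.toNat
decreasing_by
  have := PySem.Int.floordiv_eq_ediv_of_pos (a := num2) (b := 2) (by omega)
  omega

def recursiveMultiply1 (num1 : Int) (num2 : Int) : Int := rmLoopA num1 num2 0

-- ===== PORT B =====
def recursiveMultiply1_alt (num1 : Int) (num2 : Int) : Int :=
  if num2 > 0 then num1 * num2 else 0

-- ===== PRECONDITION & SPEC =====
def Spec_recursiveMultiply1 (num1 : Int) (num2 : Int) (out : Int) : Prop := out = recursiveMultiply1_alt num1 num2
instance (num1 : Int) (num2 : Int) (out : Int) : Decidable (Spec_recursiveMultiply1 num1 num2 out) := by unfold Spec_recursiveMultiply1; infer_instance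

-- ===== CLAIM (what is proved, stated in full; the proofs are below) =====
def Claim_equal_recursiveMultiply1 : Prop := ∀ (num1 : Int) (num2 : Int), Dom_recursiveMultiply1 num1 num2 → Spec_recursiveMultiply1 num1 num2 (recursiveMultiply1 num1 num2)

-- ===== LEMMAS AND PROOFS =====

-- loop invariant: for num2 > 0 the accumulator loop adds exactly num1 * num2
theorem rmLoopA_closed (num2 num1 result : Int) :
    rmLoopA num1 num2 result = result + (if num2 > 0 then num1 * num2 else 0) := by
  by_cases h : num2 > 0
  · have hd := PySem.Int.floordiv_eq_ediv_of_pos (a := num2) (b := 2) (by omega : (0:Int) < 2)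
    have hm := PySem.Int.mod_eq_emod_of_pos (a := num2) (b := 2) (by omega : (0:Int) < 2)
    have ih := rmLoopA_closed (PySem.Int.floordiv num2 2) (num1 * 2)
    rw [rmLoopA, dif_pos h, ih, if_pos h, hd, hm]
    have hs : num2 = 2 * (num2 / 2) + num2 % 2 := by omega
    split_ifs with hmod hq hq
    · rw [hmod] at hs; linear_combination -num1 * hs
    · have h1 : num2 = 1 := by omega
      subst h1; ring
    · have h0 : num2 % 2 = 0 := by omega
      rw [h0] at hs; linear_combination -num1 * hs
    · omega
  · rw [rmLoopA, dif_neg h, if_neg h]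
    ring
termination_by num2.toNat
decreasing_by
  have := PySem.Int.floordiv_eq_ediv_of_pos (a := num2) (b := 2) (by omega : (0:Int) < 2)
  omega

-- ===== VERDICT =====
theorem recursiveMultiply1_spec : Claim_equal_recursiveMultiply1 := by
  intro num1 num2 _
  show recursiveMultiply1 num1 num2 = recursiveMultiply1_alt num1 num2
  rw [recursiveMultiply1, rmLoopA_closed, recursiveMultiply1_alt]; ring
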